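-- pv_equiv track=rewrite | github.com/daun-up/algorithm | 프로그래머스/1/138477. 명예의 전당 （1）/명예의 전당 （1）.py | solution
-- ===== SOURCE A (Python) =====
-- def solution(k, score):
--     answer = []
--     tmp = []
--
--     for i in range(len(score)):
--         tmp.append(score[i])
--         tmp.sort(reverse=True)
--         tmp = tmp[:k]
--         answer.append(tmp[-1])
--
--     return answer
-- ===== SOURCE B (Python) =====
-- def solution(k, score):
--     answer = []
--     top = []  # ascending list of at most k of the largest scores seen so far
--     for x in score:
--         if len(top) == k and x <= top[0]:
--             # board is full and x does not beat the cutoff: nothing changes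
--             answer.append(top[0])
--             continue
--         lo, hi = 0, len(top)
--         while lo < hi:  # binary search for the insertion point (rightmost)
--             mid = (lo + hi) // 2
--             if top[mid] <= x:
--                 lo = mid + 1
--             else:
--                 hi = mid
--         top.insert(lo, x)
--         if len(top) > k:
--             top.pop(0)
--         answer.append(top[0])
--     return answer
-- ===== Notes on version B (the rewrite author's own statement) =====
-- stated objective: faster
-- what changed: Instead of re-sorting and re-slicing the whole kept list at every step, B maintains one ascending board of at most k scores: a score below a full board's cutoff changes nothing (O(1) skip), otherwise a binary search finds the insertion point and the smallest entry is dropped when oversize; the answer is always the board's head.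
import Mathlib
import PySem

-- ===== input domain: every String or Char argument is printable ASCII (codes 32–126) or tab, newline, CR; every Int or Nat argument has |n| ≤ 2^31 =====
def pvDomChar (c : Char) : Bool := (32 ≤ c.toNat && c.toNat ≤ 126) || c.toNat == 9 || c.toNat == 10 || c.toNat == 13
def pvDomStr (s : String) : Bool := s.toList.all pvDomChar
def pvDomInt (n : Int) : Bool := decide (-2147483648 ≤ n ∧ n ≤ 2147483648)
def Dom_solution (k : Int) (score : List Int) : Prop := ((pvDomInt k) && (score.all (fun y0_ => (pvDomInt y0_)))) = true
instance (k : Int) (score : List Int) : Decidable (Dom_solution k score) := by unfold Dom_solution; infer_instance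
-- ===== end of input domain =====

-- B replaces A's per-step full sort + slice with one ordered insertion into an ascending list of ≤ k scores (alternative decomposition, same results).


-- ===== PORT A =====
-- tmp.append(score[i]); tmp.sort(reverse=True); tmp = tmp[:k]; answer.append(tmp[-1])
-- (tmp[-1] on [] is the IndexError excluded by Pre_; the .getD 0 is never reached inside Pre_)
def stepA (k : Int) (st : List Int × List Int) (x : Int) : List Int × List Int :=
  let tmp := PySem.List.slice (PySem.List.sorted (st.2 ++ [x]) (fun y => y) true) none (some k)
  (st.1 ++ [(PySem.List.pyGet? tmp (-1)).getD 0], tmp)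

def solution (k : Int) (score : List Int) : List Int :=
  (score.foldl (stepA k) ([], [])).1

-- ===== PORT B =====
-- the while loop 'while lo < hi: mid = (lo+hi)//2; …' (lo, hi are always ≥ 0 and within top,
-- so Nat lo hi and Nat division are exact and top[mid] never raises)
-- the interval shrinks by at least 1 each pass, so 'hi - lo' passes always suffice: the
-- fuel only makes the recursion structural, it never cuts the loop short
def bsrAux (top : List Int) (x : Int) : Nat → Nat → Nat → Nat
  | 0, lo, _ => lo
  | fuel + 1, lo, hi =>
      if lo < hi then
        let mid := (lo + hi) / 2
        if PySem.List.pyGetD top (mid : Int) 0 ≤ x then bsrAux top x fuel (mid + 1) hi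
        else bsrAux top x fuel lo mid
      else lo

def bsr (top : List Int) (x : Int) (lo hi : Nat) : Nat := bsrAux top x (hi - lo) lo hi

-- top[0] on [] is the IndexError excluded by Pre_; the .headD 0 is never reached inside Pre_
def stepB (k : Int) (st : List Int × List Int) (x : Int) : List Int × List Int :=
  if (st.2.length : Int) = k ∧ x ≤ st.2.headD 0 then
    (st.1 ++ [st.2.headD 0], st.2)
  else
    let top := PySem.List.insert st.2 ((bsr st.2 x 0 st.2.length : Nat) : Int) x
    let top := if (top.length : Int) > k then top.tail else top
    (st.1 ++ [top.headD 0], top)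

def solution_alt (k : Int) (score : List Int) : List Int :=
  (score.foldl (stepB k) ([], [])).1

-- ===== PRECONDITION & SPEC =====
-- Pre_ excludes exactly the crashes: with a nonempty score and k ≤ 0 both programs hit an
-- IndexError on the very first iteration (A on tmp[-1] of an empty slice, B on top[0]).
def Pre_solution (k : Int) (score : List Int) : Prop := score = [] ∨ 1 ≤ k
instance (k : Int) (score : List Int) : Decidable (Pre_solution k score) := by unfold Pre_solution; infer_instance
def pvWitness_solution : Int × List Int := (3, [10, 100, 20, 150, 1, 100, 200])
def Spec_solution (k : Int) (score : List Int) (out : List Int) : Prop := out = solution_alt k score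
instance (k : Int) (score : List Int) (out : List Int) : Decidable (Spec_solution k score out) := by unfold Spec_solution; infer_instance

-- ===== CLAIM (what is proved, stated in full; the proofs are below) =====
def Claim_equal_solution : Prop := ∀ (k : Int) (score : List Int), Dom_solution k score → Pre_solution k score → Spec_solution k score (solution k score)

-- ===== LEMMAS AND PROOFS =====

-- proof-side model of the ordered insertion that bsr + insert performs
def insAsc (x : Int) : List Int → List Int
  | [] => [x]
  | y :: ys => if y ≤ x then y :: insAsc x ys else x :: y :: ys

theorem insAsc_eq_takeWhile (x : Int) (l : List Int) :
    insAsc x l = l.takeWhile (fun y => decide (y ≤ x)) ++ x :: l.dropWhile (fun y => decide (y ≤ x)) := by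
  induction l with
  | nil => simp [insAsc]
  | cons y ys ih =>
      simp only [insAsc, List.takeWhile, List.dropWhile]
      by_cases h : y ≤ x
      · simp [h, ih]
      · simp [h]

theorem getD_le_iff (x : Int) (l : List Int) (h : l.Pairwise (· ≤ ·)) :
    ∀ i, i < l.length → (l.getD i 0 ≤ x ↔ i < (l.takeWhile (fun y => decide (y ≤ x))).length) := by
  induction l with
  | nil => intro i hi; simp at hi
  | cons y ys ih =>
      rcases List.pairwise_cons.mp h with ⟨hy, hys⟩
      intro i hi
      cases i with
      | zero =>
          by_cases hx : y ≤ x <;> simp [List.takeWhile, hx]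
      | succ j =>
          by_cases hx : y ≤ x
          · simpa [List.takeWhile, hx] using ih hys j (by simpa using hi)
          · simp only [List.takeWhile, hx]
            simp only [List.length_cons] at hi
            constructor
            · intro hle
              exfalso
              have hj : j < ys.length := by omega
              have hmem : ys.getD j 0 ∈ ys := by
                rw [List.getD_eq_getElem?_getD, List.getElem?_eq_getElem hj]
                simp
              have h1 : y ≤ ys.getD j 0 := hy _ hmem
              have h2 : ys.getD j 0 ≤ x := by simpa using hle
              omega
            · intro hlt; simp at hlt
  
theorem bsrAux_eq (x : Int) (l : List Int) (h : l.Pairwise (· ≤ ·)) :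
    ∀ fuel lo hi, hi - lo ≤ fuel → lo ≤ (l.takeWhile (fun y => decide (y ≤ x))).length →
      (l.takeWhile (fun y => decide (y ≤ x))).length ≤ hi → hi ≤ l.length →
      bsrAux l x fuel lo hi = (l.takeWhile (fun y => decide (y ≤ x))).length := by
  intro fuel
  induction fuel with
  | zero => intro lo hi hf hlo hhi hlen; simp only [bsrAux]; omega
  | succ fuel ih =>
      intro lo hi hf hlo hhi hlen
      simp only [bsrAux]
      by_cases hlt : lo < hi
      · have hmid : (lo + hi) / 2 < l.length := by omega
        rw [if_pos hlt]
        simp only [PySem.List.pyGetD_natCast, List.getD_eq_getElem?_getD]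
        rw [← List.getD_eq_getElem?_getD]
        by_cases hc : l.getD ((lo + hi) / 2) 0 ≤ x
        · rw [if_pos hc]
          have hw := (getD_le_iff x l h _ hmid).mp hc
          exact ih _ _ (by omega) (by omega) hhi hlen
        · rw [if_neg hc]
          have hw : ¬ ((lo + hi) / 2 < (l.takeWhile (fun y => decide (y ≤ x))).length) :=
            fun hcon => hc ((getD_le_iff x l h _ hmid).mpr hcon)
          exact ih _ _ (by omega) hlo (by omega) (by omega)
      · rw [if_neg hlt]; omega

theorem bsr_eq (x : Int) (l : List Int) (h : l.Pairwise (· ≤ ·)) :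
    ∀ lo hi, lo ≤ (l.takeWhile (fun y => decide (y ≤ x))).length →
      (l.takeWhile (fun y => decide (y ≤ x))).length ≤ hi → hi ≤ l.length →
      bsr l x lo hi = (l.takeWhile (fun y => decide (y ≤ x))).length := by
  intro lo hi hlo hhi hlen
  exact bsrAux_eq x l h (hi - lo) lo hi le_rfl hlo hhi hlen

theorem insert_eq_insAsc (x : Int) (l : List Int) (h : l.Pairwise (· ≤ ·)) :
    PySem.List.insert l ((bsr l x 0 l.length : Nat) : Int) x = insAsc x l := by
  rw [insAsc_eq_takeWhile]
  set tw := l.takeWhile (fun y => decide (y ≤ x)) with htw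
  have ht : tw ++ l.dropWhile (fun y => decide (y ≤ x)) = l := by
    rw [htw]; exact l.takeWhile_append_dropWhile
  have hwle : tw.length ≤ l.length := by
    conv_rhs => rw [← ht]
    simp
  have hb : bsr l x 0 l.length = tw.length := bsr_eq x l h 0 l.length (by omega) hwle le_rfl
  rw [hb, PySem.List.insert_natCast l _ x hwle]
  have htake : l.take tw.length = tw := by
    conv_lhs => rw [← ht]
    exact List.take_left
  have hdrop : l.drop tw.length = l.dropWhile (fun y => decide (y ≤ x)) := by
    conv_lhs => rw [← ht]
    exact List.drop_left
  rw [htake, hdrop]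

theorem insAsc_perm (x : Int) (l : List Int) : (insAsc x l).Perm (x :: l) := by
  induction l with
  | nil => simp [insAsc]
  | cons y ys ih =>
      simp only [insAsc]
      split
      · exact ((ih.cons y).trans (List.Perm.swap x y ys))
      · rfl

theorem insAsc_length (x : Int) (l : List Int) : (insAsc x l).length = l.length + 1 :=
  (insAsc_perm x l).length_eq

theorem insAsc_pairwise (x : Int) (l : List Int) (h : l.Pairwise (· ≤ ·)) :
    (insAsc x l).Pairwise (· ≤ ·) := by
  induction l with
  | nil => simp [insAsc]
  | cons y ys ih =>
      simp only [insAsc]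
      rcases List.pairwise_cons.mp h with ⟨hy, hys⟩
      split
      · rename_i hyx
        refine List.pairwise_cons.mpr ⟨?_, ih hys⟩
        intro a ha
        rcases List.mem_cons.mp ((insAsc_perm x ys).mem_iff.mp ha) with rfl | ha
        · exact hyx
        · exact hy a ha
      · rename_i hyx
        refine List.pairwise_cons.mpr ⟨?_, h⟩
        intro a ha
        rcases List.mem_cons.mp ha with rfl | ha
        · omega
        · exact le_trans (by omega) (hy a ha)

-- names A's sorted result: sorting tmp ++ [x] descending is the reverse of inserting x into tmp.reverse
theorem sorted_step (x : Int) (tmp : List Int) (h : tmp.Pairwise (fun a b => a ≥ b)) :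
    PySem.List.sorted (tmp ++ [x]) (fun y => y) true = (insAsc x tmp.reverse).reverse := by
  have hrev : tmp.reverse.Pairwise (· ≤ ·) := by
    rw [List.pairwise_reverse]; exact h
  have hperm : ((insAsc x tmp.reverse).reverse).Perm (tmp ++ [x]) := by
    refine (List.reverse_perm _).trans ?_
    refine (insAsc_perm x tmp.reverse).trans ?_
    refine ((tmp.reverse_perm.cons x)).trans ?_
    exact (List.perm_append_singleton x tmp).symm
  have hpw : ((insAsc x tmp.reverse).reverse).Pairwise (fun a b => a ≥ b) := by
    rw [List.pairwise_reverse]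
    simpa using insAsc_pairwise x tmp.reverse hrev
  have hs := PySem.List.sorted_pairwise_rev (xs := tmp ++ [x]) (key := fun y => y)
  have hp := PySem.List.sorted_perm (xs := tmp ++ [x]) (key := fun y => y) (rev := true)
  exact List.Perm.eq_of_pairwise' hs hpw (hp.trans hperm.symm)

theorem head_of_rev (l : List Int) : (PySem.List.pyGet? l.reverse (-1)).getD 0 = l.headD 0 := by
  rw [PySem.List.pyGet?_neg_one, List.getLast?_reverse]
  cases l <;> simp

-- the loop invariant: A's running state is B's running state reversed, and the answer lists coincide
theorem loop_eq (k : Int) (hk : 1 ≤ k) (l : List Int) :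
    ∀ (ans tmp : List Int), tmp.Pairwise (fun a b => a ≥ b) → (tmp.length : Int) ≤ k →
    l.foldl (stepA k) (ans, tmp)
    = ((l.foldl (stepB k) (ans, tmp.reverse)).1, (l.foldl (stepB k) (ans, tmp.reverse)).2.reverse) := by
  induction l with
  | nil => intro ans tmp _ _; simp
  | cons x xs ih =>
      intro ans tmp hpw hlen
      simp only [List.foldl_cons]
      by_cases hskip : ((tmp.reverse).length : Int) = k ∧ x ≤ (tmp.reverse).headD 0
      · -- skip case: the board is full and x does not beat the cutoff, both states are unchanged
        obtain ⟨hlenk, hxle⟩ := hskip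
        have hall : ∀ y ∈ tmp, x ≤ y := by
          intro y hy
          have hrevpw : tmp.reverse.Pairwise (· ≤ ·) := by rw [List.pairwise_reverse]; exact hpw
          have hyr : y ∈ tmp.reverse := by simpa using hy
          rcases hr : tmp.reverse with _ | ⟨a, t⟩
          · rw [hr] at hyr; simp at hyr
          · rw [hr] at hrevpw hyr hxle
            rcases List.mem_cons.mp hyr with rfl | hyt
            · simpa using hxle
            · exact le_trans (by simpa using hxle) ((List.pairwise_cons.mp hrevpw).1 y hyt)
        have hpw' : (tmp ++ [x]).Pairwise (fun a b => a ≥ b) := by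
          rw [List.pairwise_append]
          refine ⟨hpw, by simp, ?_⟩
          intro a ha b hb
          rw [List.mem_singleton] at hb
          subst hb
          exact hall a ha
        have hsorted : PySem.List.sorted (tmp ++ [x]) (fun y => y) true = tmp ++ [x] :=
          PySem.List.sorted_rev_eq_self_of_pairwise (tmp ++ [x]) (fun y => y) hpw'
        have hslice : PySem.List.slice (tmp ++ [x]) none (some k) = tmp := by
          have hkNat : (k.toNat : Int) = k := by omega
          rw [← hkNat, PySem.List.slice_to_natCast]
          have hkl : k.toNat = tmp.length := by
            rw [List.length_reverse] at hlenk; omega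
          rw [hkl]
          exact List.take_left
        have hget : (PySem.List.pyGet? tmp (-1)).getD 0 = tmp.reverse.headD 0 := by
          have h := head_of_rev tmp.reverse
          rwa [List.reverse_reverse] at h
        have hA : stepA k (ans, tmp) x = (ans ++ [tmp.reverse.headD 0], tmp) := by
          simp only [stepA]
          rw [hsorted, hslice, hget]
        have hB : stepB k (ans, tmp.reverse) x = (ans ++ [tmp.reverse.headD 0], tmp.reverse) := by
          simp only [stepB]
          rw [if_pos (⟨hlenk, hxle⟩ : ((tmp.reverse).length : Int) = k ∧ x ≤ (tmp.reverse).headD 0)]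
        rw [hA, hB, ih (ans ++ [tmp.reverse.headD 0]) tmp hpw hlen]
      · -- insertion case
        have hsort := sorted_step x tmp hpw
        have hrevpw' : tmp.reverse.Pairwise (· ≤ ·) := by rw [List.pairwise_reverse]; exact hpw
        have hins : PySem.List.insert tmp.reverse ((bsr tmp.reverse x 0 tmp.reverse.length : Nat) : Int) x
            = insAsc x tmp.reverse := insert_eq_insAsc x tmp.reverse hrevpw'
        set I : List Int := insAsc x tmp.reverse with hI
        have hIlen : I.length = tmp.length + 1 := by
          rw [hI, insAsc_length, List.length_reverse]
        have hIpw : I.Pairwise (· ≤ ·) := by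
          refine insAsc_pairwise x tmp.reverse ?_
          rw [List.pairwise_reverse]; exact hpw
        have hkNat : (k.toNat : Int) = k := by omega
        by_cases hbig : (I.length : Int) > k
        · -- pop case: tmp.length = k, the slice keeps all but the smallest
          have hslice : PySem.List.slice I.reverse none (some k) = I.reverse.take k.toNat := by
            rw [← hkNat, PySem.List.slice_to_natCast]; simp; omega
          have hlenIr : I.reverse.length = k.toNat + 1 := by
            rw [List.length_reverse, hIlen]; omega
          have hdl : I.reverse.dropLast = I.tail.reverse := by
            have h1 : I.reverse.reverse.tail = I.reverse.dropLast.reverse := List.tail_reverse (l := I.reverse)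
            rw [List.reverse_reverse] at h1
            rw [h1, List.reverse_reverse]
          have hnew : PySem.List.slice I.reverse none (some k) = I.tail.reverse := by
            rw [hslice, List.dropLast_eq_take] at *
            rw [hlenIr] at *
            simpa using hdl
          have htlen : ((I.tail.reverse).length : Int) ≤ k := by
            simp [hIlen]; omega
          have htpwAsc : I.tail.Pairwise (· ≤ ·) := List.Pairwise.sublist (List.tail_sublist I) hIpw
          have htpw : I.tail.reverse.Pairwise (fun a b => a ≥ b) := by
            rw [List.pairwise_reverse]; exact htpwAsc
          have hA : stepA k (ans, tmp) x = (ans ++ [I.tail.headD 0], I.tail.reverse) := by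
            simp only [stepA]
            rw [hsort, hnew, head_of_rev]
          have hB : stepB k (ans, tmp.reverse) x = (ans ++ [I.tail.headD 0], I.tail) := by
            simp only [stepB]
            rw [if_neg hskip, hins, if_pos hbig]
          rw [hA, hB, ih (ans ++ [I.tail.headD 0]) I.tail.reverse htpw htlen,
            List.reverse_reverse]
        · -- no pop: the slice keeps everything
          have hslice : PySem.List.slice I.reverse none (some k) = I.reverse := by
            rw [← hkNat, PySem.List.slice_to_natCast]
            refine List.take_of_length_le ?_
            rw [List.length_reverse]; omega
          have hIpw' : I.reverse.Pairwise (fun a b => a ≥ b) := by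
            rw [List.pairwise_reverse]; exact hIpw
          have hIlenInt : ((I.reverse).length : Int) ≤ k := by
            rw [List.length_reverse]; omega
          have hA : stepA k (ans, tmp) x = (ans ++ [I.headD 0], I.reverse) := by
            simp only [stepA]
            rw [hsort, hslice, head_of_rev]
          have hB : stepB k (ans, tmp.reverse) x = (ans ++ [I.headD 0], I) := by
            simp only [stepB]
            rw [if_neg hskip, hins, if_neg hbig]
          rw [hA, hB, ih (ans ++ [I.headD 0]) I.reverse hIpw' hIlenInt,
            List.reverse_reverse]

-- ===== VERDICT (by name: the statement is the Claim_ definition above) =====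
theorem solution_spec : Claim_equal_solution := by
  intro k score _ hpre
  unfold Spec_solution solution solution_alt
  rcases hpre with rfl | hk
  · rfl
  · rw [loop_eq k hk score [] [] (by simp) (by simp; omega)]; simp
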